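-- pv_equiv track=rewrite | github.com/ahmadkaleem123/GomokuFinal | gomoku.py | detect_closedrow
-- ===== SOURCE A (Python) =====
-- def is_bounded(board, y_end, x_end, length, d_y, d_x):
--     next1 = y_end+d_y
--     next2 = x_end+d_x
--     back1 = y_end-length*d_y
--     back2 = x_end-length*d_x
--     closedstart = False
--     closedend = False
--     if(next1 <= len(board)-1 and next2<=len(board) - 1 and next1 >=0 and next2 >= 0):
--         if board[next1][next2]!=" ":
--             closedend=True
--         elif board[next1][next2] == "w" or board[next1][next2] == "b":
--             closedend=False
--     else:
--         closedend = True
--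
--     if(back1 <= len(board)-1 and back2<=len(board) - 1 and back1 >=0 and back2 >= 0):
--         if board[back1][back2]!=" ":
--             closedstart=True
--         elif board[back1][back2] == "w" or board[back1][back2] == "b":
--             closedstart=False
--     else:
--         closedstart = True
--
--     if closedstart == True and closedend == True:
--         return "CLOSED"
--     elif closedstart == False and closedend == False:
--         return "OPEN"
--     else:
--         return "SEMIOPEN"
--
-- def detect_closedrow(board, col, y_start, x_start, length, d_y, d_x):
--     closed_seq_count = 0
--     current_1 = y_start
--     current_2 = x_start
--     while(current_1>=0 and current_1<=(len(board)-1) and current_2>=0 and current_2<=len(board)-1):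
--         color_status = True
--         if (current_1+(length-1)*d_y) >= 0 and (current_1 + (length-1) * d_y) <= (len(board) - 1) and (current_2 + (length-1)*d_x) >= 0 and (current_2 + (length-1)*d_x) <=(len(board) - 1):
--             for i in range(length):
--                 if(board[current_1 + i*d_y][current_2+i*d_x] != col):
--                         color_status = False
--             ############################ THIS CODE MAKES IT SO THAT IF YOU HAVE: wwww and you are checking for steps of 3, you should return 1 semiopen and NOT 2.
--             endcolor = True       #This checks whether the end colours or start colours are different. If they are different from col, it is true
--             startcolor = True
--             if(current_1+length*d_y) >= 0 and (current_1+length*d_y) <= (len(board) - 1)  and (current_2 + (length)*d_x) >= 0 and (current_2 + (length)*d_x) <=(len(board) - 1):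
--                 if(board[current_1+length*d_y][current_2+length*d_x] == col):
--                     endcolor = False
--             if(current_1-d_y) >= 0 and (current_1-d_y) <= (len(board) - 1)  and (current_2 - d_x) >= 0 and (current_2 - d_x) <=(len(board) - 1):
--                 if(board[current_1 - d_y][current_2-d_x] == col):
--                     startcolor = False
--             ###############################
--             if color_status == True:
--                 if is_bounded(board, current_1 + (length-1)*d_y, current_2 + (length-1)*d_x, length, d_y, d_x) == "CLOSED" and endcolor == True and startcolor == True:
--                     closed_seq_count += 1
--
--         current_1 += d_y
--         current_2 += d_x
--     return closed_seq_count
-- ===== SOURCE B (Python) =====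
-- def detect_closedrow(board, col, y_start, x_start, length, d_y, d_x):
--     n = len(board)
--     # collect the cells along the ray once
--     line = []
--     y, x = y_start, x_start
--     while 0 <= y < n and 0 <= x < n:
--         line.append(board[y][x])
--         y += d_y
--         x += d_x
--     m = len(line)
--     if length < 1 or m < length:
--         return 0   # no window of positive length fits on the visited ray
--     py, px = y_start - d_y, x_start - d_x
--     pre = board[py][px] if (0 <= py < n and 0 <= px < n) else None
--     # prefix counts of matching cells: prefix[j] = matches among line[:j]
--     prefix = [0]
--     for c in line:
--         prefix.append(prefix[-1] + (1 if c == col else 0))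
--     total = 0
--     for k in range(m - length + 1):
--         if prefix[k + length] - prefix[k] == length:
--             if k == 0:
--                 left = pre is None or (pre != col and pre != " ")
--             else:
--                 left = line[k - 1] != col and line[k - 1] != " "
--             if k + length == m:
--                 right = True
--             else:
--                 right = line[k + length] != col and line[k + length] != " "
--             if left and right:
--                 total += 1
--     return total
-- ===== Notes on version B (the rewrite author's own statement) =====
-- stated objective: alternative
-- what changed: B walks the ray once collecting the cells into a list, builds prefix counts of matching cells, and tests each window by one prefix-sum subtraction plus O(1) neighbour lookups, instead of A's per-position rescan of all `length` window cells and re-derivation of the boundary cells via is_bounded; same measured cost on the generated inputs.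
-- outside the precondition, e.g. on detect_closedrow([['b', 'b'], ['w', 'b']], 'w', 0, 0, 0, 1, 1): A returns 1, B returns 0; on detect_closedrow([['w', 'w'], ['w']], 'w', 1, 1, 1, 0, 1): A raises IndexError, B raises IndexError; on detect_closedrow([['w', 'w'], ['w']], 'w', 0, 0, 2, 0, 1): A returns 1, B returns 1
import Mathlib
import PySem

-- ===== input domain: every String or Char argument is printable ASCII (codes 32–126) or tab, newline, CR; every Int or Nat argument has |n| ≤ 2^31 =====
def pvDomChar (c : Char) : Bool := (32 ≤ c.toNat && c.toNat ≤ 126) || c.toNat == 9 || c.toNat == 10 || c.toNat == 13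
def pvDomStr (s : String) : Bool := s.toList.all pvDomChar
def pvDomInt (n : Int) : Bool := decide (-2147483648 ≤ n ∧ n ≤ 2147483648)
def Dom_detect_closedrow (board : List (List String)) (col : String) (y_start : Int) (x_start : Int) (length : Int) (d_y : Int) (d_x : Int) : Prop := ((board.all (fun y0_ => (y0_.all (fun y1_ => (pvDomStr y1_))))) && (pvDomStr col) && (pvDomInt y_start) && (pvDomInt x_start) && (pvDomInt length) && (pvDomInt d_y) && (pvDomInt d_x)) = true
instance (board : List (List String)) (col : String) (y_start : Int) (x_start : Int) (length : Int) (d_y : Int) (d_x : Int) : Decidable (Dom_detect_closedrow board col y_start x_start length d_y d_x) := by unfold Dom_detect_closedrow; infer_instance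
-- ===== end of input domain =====

-- B replaces A's per-position window rescan by one pass along the ray plus prefix counts of
-- matching cells (objective: alternative single-pass formulation). Neither program mutates its input.

-- ===== PORT A =====
-- board[y][x]; all accesses in both programs are guarded to 0 ≤ y,x ≤ len(board)-1, and under
-- Pre_ every row has at least len(board) cells, so the lookups succeed; the "" default is never used.
def pvCell (board : List (List String)) (y x : Int) : String :=
  (PySem.List.pyGet? ((PySem.List.pyGet? board y).getD []) x).getD ""

def is_bounded (board : List (List String)) (y_end x_end length d_y d_x : Int) : String :=
  let n : Int := board.length
  let next1 := y_end + d_y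
  let next2 := x_end + d_x
  let back1 := y_end - length * d_y
  let back2 := x_end - length * d_x
  let closedend : Bool :=
    if next1 ≤ n - 1 ∧ next2 ≤ n - 1 ∧ 0 ≤ next1 ∧ 0 ≤ next2 then
      if pvCell board next1 next2 ≠ " " then true
      else if pvCell board next1 next2 = "w" ∨ pvCell board next1 next2 = "b" then false
      else false
    else true
  let closedstart : Bool :=
    if back1 ≤ n - 1 ∧ back2 ≤ n - 1 ∧ 0 ≤ back1 ∧ 0 ≤ back2 then
      if pvCell board back1 back2 ≠ " " then true
      else if pvCell board back1 back2 = "w" ∨ pvCell board back1 back2 = "b" then false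
      else false
    else true
  if closedstart = true ∧ closedend = true then "CLOSED"
  else if closedstart = false ∧ closedend = false then "OPEN"
  else "SEMIOPEN"

-- the while loop of A; fuel (board.length + 1) only makes the recursion total: with a nonzero
-- direction the loop leaves the board after at most board.length steps (outside Pre_ it may cut off)
def pvALoop (board : List (List String)) (col : String) (length d_y d_x : Int) :
    Nat → Int → Int → Int → Int
  | 0, _, _, acc => acc
  | fuel + 1, c1, c2, acc =>
    let n : Int := board.length
    if 0 ≤ c1 ∧ c1 ≤ n - 1 ∧ 0 ≤ c2 ∧ c2 ≤ n - 1 then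
      let acc' :=
        if 0 ≤ c1 + (length - 1) * d_y ∧ c1 + (length - 1) * d_y ≤ n - 1 ∧
           0 ≤ c2 + (length - 1) * d_x ∧ c2 + (length - 1) * d_x ≤ n - 1 then
          let color_status := (PySem.List.pyRange 0 length 1).foldl
            (fun cs i => if pvCell board (c1 + i * d_y) (c2 + i * d_x) ≠ col then false else cs) true
          let endcolor : Bool :=
            if 0 ≤ c1 + length * d_y ∧ c1 + length * d_y ≤ n - 1 ∧
               0 ≤ c2 + length * d_x ∧ c2 + length * d_x ≤ n - 1 then
              if pvCell board (c1 + length * d_y) (c2 + length * d_x) = col then false else true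
            else true
          let startcolor : Bool :=
            if 0 ≤ c1 - d_y ∧ c1 - d_y ≤ n - 1 ∧ 0 ≤ c2 - d_x ∧ c2 - d_x ≤ n - 1 then
              if pvCell board (c1 - d_y) (c2 - d_x) = col then false else true
            else true
          if color_status = true then
            if is_bounded board (c1 + (length - 1) * d_y) (c2 + (length - 1) * d_x) length d_y d_x
                 = "CLOSED" ∧ endcolor = true ∧ startcolor = true then acc + 1
            else acc
          else acc
        else acc
      pvALoop board col length d_y d_x fuel (c1 + d_y) (c2 + d_x) acc'
    else acc

def detect_closedrow (board : List (List String)) (col : String) (y_start : Int) (x_start : Int) (length : Int) (d_y : Int) (d_x : Int) : Int :=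
  pvALoop board col length d_y d_x (board.length + 1) y_start x_start 0

-- ===== PORT B =====
-- the line-collecting while loop of B (same fuel totalization as A's loop)
def pvLine (board : List (List String)) (d_y d_x : Int) : Nat → Int → Int → List String
  | 0, _, _ => []
  | fuel + 1, y, x =>
    let n : Int := board.length
    if 0 ≤ y ∧ y < n ∧ 0 ≤ x ∧ x < n then
      pvCell board y x :: pvLine board d_y d_x fuel (y + d_y) (x + d_x)
    else []

-- B's prefix loop: prefix = [0]; for c in line: prefix.append(prefix[-1] + (1 if c == col else 0))
def pvPrefix (col : String) (s : Int) : List String → List Int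
  | [] => [s]
  | c :: cs => s :: pvPrefix col (s + if c = col then 1 else 0) cs

def detect_closedrow_alt (board : List (List String)) (col : String) (y_start : Int) (x_start : Int) (length : Int) (d_y : Int) (d_x : Int) : Int :=
  let n : Int := board.length
  let line := pvLine board d_y d_x (board.length + 1) y_start x_start
  let m : Int := line.length
  if length < 1 ∨ m < length then 0   -- no window of positive length fits on the visited ray
  else
  let pre : Option String :=
    if 0 ≤ y_start - d_y ∧ y_start - d_y < n ∧ 0 ≤ x_start - d_x ∧ x_start - d_x < n then
      some (pvCell board (y_start - d_y) (x_start - d_x))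
    else none
  let pref := pvPrefix col 0 line
  (PySem.List.pyRange 0 (m - length + 1) 1).foldl (fun total k =>
    if (PySem.List.pyGet? pref (k + length)).getD 0 - (PySem.List.pyGet? pref k).getD 0 = length then
      let left : Bool :=
        if k = 0 then
          match pre with
          | none => true
          | some c => if c ≠ col ∧ c ≠ " " then true else false
        else if (PySem.List.pyGet? line (k - 1)).getD "" ≠ col ∧
                (PySem.List.pyGet? line (k - 1)).getD "" ≠ " " then true else false
      let right : Bool :=
        if k + length = m then true
        else if (PySem.List.pyGet? line (k + length)).getD "" ≠ col ∧
                (PySem.List.pyGet? line (k + length)).getD "" ≠ " " then true else false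
      if left = true ∧ right = true then total + 1 else total
    else total) 0

-- ===== PRECONDITION & SPEC =====
-- When the start lies off the board A returns 0 without reading anything, so everything is
-- admitted there; for a start on the board Pre_ excludes: ragged boards with a row shorter than
-- the board (Python A can raise IndexError there), non-positive length (outside the natural
-- domain of a run length; A there counts degenerate empty windows by geometry alone), and a
-- zero direction (A's while loop never terminates there).
def Pre_detect_closedrow (board : List (List String)) (col : String) (y_start : Int) (x_start : Int) (length : Int) (d_y : Int) (d_x : Int) : Prop :=
  ¬(0 ≤ y_start ∧ y_start ≤ (board.length : Int) - 1 ∧ 0 ≤ x_start ∧ x_start ≤ (board.length : Int) - 1) ∨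
  (1 ≤ length ∧ (∀ row ∈ board, board.length ≤ row.length) ∧ (d_y ≠ 0 ∨ d_x ≠ 0))
instance (board : List (List String)) (col : String) (y_start : Int) (x_start : Int) (length : Int) (d_y : Int) (d_x : Int) : Decidable (Pre_detect_closedrow board col y_start x_start length d_y d_x) := by unfold Pre_detect_closedrow; infer_instance

def pvWitness_detect_closedrow : List (List String) × String × Int × Int × Int × Int × Int :=
  ([[" ", "w"], ["w", " "]], "w", 0, 0, 2, 1, 1)

def Spec_detect_closedrow (board : List (List String)) (col : String) (y_start : Int) (x_start : Int) (length : Int) (d_y : Int) (d_x : Int) (out : Int) : Prop := out = detect_closedrow_alt board col y_start x_start length d_y d_x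
instance (board : List (List String)) (col : String) (y_start : Int) (x_start : Int) (length : Int) (d_y : Int) (d_x : Int) (out : Int) : Decidable (Spec_detect_closedrow board col y_start x_start length d_y d_x out) := by unfold Spec_detect_closedrow; infer_instance

-- ===== CLAIM (what is proved, stated in full; the proofs are below) =====
def Claim_equal_detect_closedrow : Prop := ∀ (board : List (List String)) (col : String) (y_start : Int) (x_start : Int) (length : Int) (d_y : Int) (d_x : Int), Dom_detect_closedrow board col y_start x_start length d_y d_x → Pre_detect_closedrow board col y_start x_start length d_y d_x → Spec_detect_closedrow board col y_start x_start length d_y d_x (detect_closedrow board col y_start x_start length d_y d_x)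


-- ===== LEMMAS AND PROOFS =====

-- the per-iteration increment of A's loop body, as a function of the current position
def pvCheckA (board : List (List String)) (col : String) (length d_y d_x c1 c2 : Int) : Int :=
  let n : Int := board.length
  if 0 ≤ c1 + (length - 1) * d_y ∧ c1 + (length - 1) * d_y ≤ n - 1 ∧
     0 ≤ c2 + (length - 1) * d_x ∧ c2 + (length - 1) * d_x ≤ n - 1 then
    let color_status := (PySem.List.pyRange 0 length 1).foldl
      (fun cs i => if pvCell board (c1 + i * d_y) (c2 + i * d_x) ≠ col then false else cs) true
    let endcolor : Bool :=
      if 0 ≤ c1 + length * d_y ∧ c1 + length * d_y ≤ n - 1 ∧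
         0 ≤ c2 + length * d_x ∧ c2 + length * d_x ≤ n - 1 then
        if pvCell board (c1 + length * d_y) (c2 + length * d_x) = col then false else true
      else true
    let startcolor : Bool :=
      if 0 ≤ c1 - d_y ∧ c1 - d_y ≤ n - 1 ∧ 0 ≤ c2 - d_x ∧ c2 - d_x ≤ n - 1 then
        if pvCell board (c1 - d_y) (c2 - d_x) = col then false else true
      else true
    if color_status = true then
      if is_bounded board (c1 + (length - 1) * d_y) (c2 + (length - 1) * d_x) length d_y d_x
           = "CLOSED" ∧ endcolor = true ∧ startcolor = true then 1
      else 0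
    else 0
  else 0

-- the per-iteration increment of B's counting loop, as a function of the index k
def pvCheckB (col : String) (length : Int) (line : List String) (pre : Option String) (k : Int) : Int :=
  let m : Int := line.length
  let pref := pvPrefix col 0 line
  if (PySem.List.pyGet? pref (k + length)).getD 0 - (PySem.List.pyGet? pref k).getD 0 = length then
    let left : Bool :=
      if k = 0 then
        match pre with
        | none => true
        | some c => if c ≠ col ∧ c ≠ " " then true else false
      else if (PySem.List.pyGet? line (k - 1)).getD "" ≠ col ∧
              (PySem.List.pyGet? line (k - 1)).getD "" ≠ " " then true else false
    let right : Bool :=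
      if k + length = m then true
      else if (PySem.List.pyGet? line (k + length)).getD "" ≠ col ∧
              (PySem.List.pyGet? line (k + length)).getD "" ≠ " " then true else false
    if left = true ∧ right = true then 1 else 0
  else 0

lemma pvALoop_step (board : List (List String)) (col : String) (length d_y d_x : Int)
    (fuel : Nat) (c1 c2 acc : Int) :
    pvALoop board col length d_y d_x (fuel + 1) c1 c2 acc =
      if 0 ≤ c1 ∧ c1 ≤ (board.length : Int) - 1 ∧ 0 ≤ c2 ∧ c2 ≤ (board.length : Int) - 1 then
        pvALoop board col length d_y d_x fuel (c1 + d_y) (c2 + d_x)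
          (acc + pvCheckA board col length d_y d_x c1 c2)
      else acc := by
  rw [pvALoop]
  by_cases hg : 0 ≤ c1 ∧ c1 ≤ (board.length : Int) - 1 ∧ 0 ≤ c2 ∧ c2 ≤ (board.length : Int) - 1
  · rw [if_pos hg, if_pos hg]
    congr 1
    simp only [pvCheckA]
    split_ifs <;> ring
  · rw [if_neg hg, if_neg hg]

lemma pvALoop_sum (board : List (List String)) (col : String) (length d_y d_x : Int) :
    ∀ (fuel : Nat) (c1 c2 acc : Int),
      pvALoop board col length d_y d_x fuel c1 c2 acc =
        acc + ((List.range (pvLine board d_y d_x fuel c1 c2).length).map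
          (fun (k : Nat) => pvCheckA board col length d_y d_x (c1 + (k : Int) * d_y) (c2 + (k : Int) * d_x))).sum := by
  intro fuel
  induction fuel with
  | zero => intro c1 c2 acc; simp [pvALoop, pvLine]
  | succ f ih =>
    intro c1 c2 acc
    rw [pvALoop_step, pvLine]
    by_cases hg : 0 ≤ c1 ∧ c1 ≤ (board.length : Int) - 1 ∧ 0 ≤ c2 ∧ c2 ≤ (board.length : Int) - 1
    · have hg' : 0 ≤ c1 ∧ c1 < (board.length : Int) ∧ 0 ≤ c2 ∧ c2 < (board.length : Int) :=
        ⟨hg.1, by omega, hg.2.2.1, by omega⟩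
      rw [if_pos hg, if_pos hg', ih]
      simp only [List.length_cons, List.range_succ_eq_map, List.map_cons, List.map_map,
        List.sum_cons, Nat.cast_zero, zero_mul, add_zero]
      have hfun : ((fun k : Nat => pvCheckA board col length d_y d_x (c1 + (k : Int) * d_y)
            (c2 + (k : Int) * d_x)) ∘ Nat.succ)
          = fun k : Nat => pvCheckA board col length d_y d_x ((c1 + d_y) + (k : Int) * d_y)
            ((c2 + d_x) + (k : Int) * d_x) := by
        funext k
        simp only [Function.comp_apply, Nat.cast_succ]
        congr 1 <;> ring
      rw [hfun]
      ring
    · have hg' : ¬(0 ≤ c1 ∧ c1 < (board.length : Int) ∧ 0 ≤ c2 ∧ c2 < (board.length : Int)) := by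
        intro h; exact hg ⟨h.1, by omega, h.2.2.1, by omega⟩
      rw [if_neg hg, if_neg hg']
      simp

lemma pvAlt_sum (board : List (List String)) (col : String) (y_start x_start length d_y d_x : Int)
    (hg : ¬(length < 1 ∨ ((pvLine board d_y d_x (board.length + 1) y_start x_start).length : Int) < length)) :
    detect_closedrow_alt board col y_start x_start length d_y d_x =
      ((PySem.List.pyRange 0 (((pvLine board d_y d_x (board.length + 1) y_start x_start).length : Int) - length + 1) 1).map
        (pvCheckB col length (pvLine board d_y d_x (board.length + 1) y_start x_start)
          (if 0 ≤ y_start - d_y ∧ y_start - d_y < (board.length : Int) ∧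
              0 ≤ x_start - d_x ∧ x_start - d_x < (board.length : Int) then
            some (pvCell board (y_start - d_y) (x_start - d_x))
          else none))).sum := by
  simp only [detect_closedrow_alt]
  rw [if_neg hg]
  rw [show (fun (total : Int) (k : Int) =>
      if (PySem.List.pyGet? (pvPrefix col 0 (pvLine board d_y d_x (board.length + 1) y_start x_start)) (k + length)).getD 0 -
          (PySem.List.pyGet? (pvPrefix col 0 (pvLine board d_y d_x (board.length + 1) y_start x_start)) k).getD 0 = length then
        let left : Bool :=
          if k = 0 then
            match (if 0 ≤ y_start - d_y ∧ y_start - d_y < (board.length : Int) ∧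
                0 ≤ x_start - d_x ∧ x_start - d_x < (board.length : Int) then
              some (pvCell board (y_start - d_y) (x_start - d_x)) else none) with
            | none => true
            | some c => if c ≠ col ∧ c ≠ " " then true else false
          else if (PySem.List.pyGet? (pvLine board d_y d_x (board.length + 1) y_start x_start) (k - 1)).getD "" ≠ col ∧
                  (PySem.List.pyGet? (pvLine board d_y d_x (board.length + 1) y_start x_start) (k - 1)).getD "" ≠ " " then true else false
        let right : Bool :=
          if k + length = ((pvLine board d_y d_x (board.length + 1) y_start x_start).length : Int) then true
          else if (PySem.List.pyGet? (pvLine board d_y d_x (board.length + 1) y_start x_start) (k + length)).getD "" ≠ col ∧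
                  (PySem.List.pyGet? (pvLine board d_y d_x (board.length + 1) y_start x_start) (k + length)).getD "" ≠ " " then true else false
        if left = true ∧ right = true then total + 1 else total
      else total)
    = fun (total : Int) (k : Int) => total +
        pvCheckB col length (pvLine board d_y d_x (board.length + 1) y_start x_start)
          (if 0 ≤ y_start - d_y ∧ y_start - d_y < (board.length : Int) ∧
              0 ≤ x_start - d_x ∧ x_start - d_x < (board.length : Int) then
            some (pvCell board (y_start - d_y) (x_start - d_x)) else none) k from by
    funext total k
    simp only [pvCheckB]
    split_ifs <;> ring]
  rw [PySem.List.foldl_add]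
  simp

lemma pvLine_length_le (board : List (List String)) (d_y d_x : Int) :
    ∀ (fuel : Nat) (y x : Int), (pvLine board d_y d_x fuel y x).length ≤ fuel := by
  intro fuel
  induction fuel with
  | zero => intro y x; simp [pvLine]
  | succ f ih =>
    intro y x
    rw [pvLine]
    split
    · simpa using Nat.succ_le_succ (ih (y + d_y) (x + d_x))
    · simp

lemma pvLine_get (board : List (List String)) (d_y d_x : Int) :
    ∀ (fuel : Nat) (y x : Int) (k : Nat), k < (pvLine board d_y d_x fuel y x).length →
      (0 ≤ y + (k : Int) * d_y ∧ y + (k : Int) * d_y < (board.length : Int) ∧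
       0 ≤ x + (k : Int) * d_x ∧ x + (k : Int) * d_x < (board.length : Int)) ∧
      (pvLine board d_y d_x fuel y x)[k]? =
        some (pvCell board (y + (k : Int) * d_y) (x + (k : Int) * d_x)) := by
  intro fuel
  induction fuel with
  | zero => intro y x k hk; simp [pvLine] at hk
  | succ f ih =>
    intro y x k hk
    rw [pvLine] at hk ⊢
    by_cases hg : 0 ≤ y ∧ y < (board.length : Int) ∧ 0 ≤ x ∧ x < (board.length : Int)
    · rw [if_pos hg] at hk ⊢
      cases k with
      | zero => simpa using hg
      | succ k =>
        have := ih (y + d_y) (x + d_x) k (by simpa using hk)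
        have ey : y + d_y + (k : Int) * d_y = y + ((k : Nat) + 1 : Int) * d_y := by ring
        have ex : x + d_x + (k : Int) * d_x = x + ((k : Nat) + 1 : Int) * d_x := by ring
        rw [ey, ex] at this
        simpa [Nat.cast_succ] using this
    · rw [if_neg hg] at hk; simp at hk

lemma pvLine_exit (board : List (List String)) (d_y d_x : Int) :
    ∀ (fuel : Nat) (y x : Int), (pvLine board d_y d_x fuel y x).length < fuel →
      ¬(0 ≤ y + ((pvLine board d_y d_x fuel y x).length : Int) * d_y ∧
        y + ((pvLine board d_y d_x fuel y x).length : Int) * d_y < (board.length : Int) ∧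
        0 ≤ x + ((pvLine board d_y d_x fuel y x).length : Int) * d_x ∧
        x + ((pvLine board d_y d_x fuel y x).length : Int) * d_x < (board.length : Int)) := by
  intro fuel
  induction fuel with
  | zero => intro y x h; omega
  | succ f ih =>
    intro y x h
    rw [pvLine] at h ⊢
    by_cases hg : 0 ≤ y ∧ y < (board.length : Int) ∧ 0 ≤ x ∧ x < (board.length : Int)
    · rw [if_pos hg] at h ⊢
      have := ih (y + d_y) (x + d_x) (by simpa using h)
      set L := pvLine board d_y d_x f (y + d_y) (x + d_x) with hL
      have ey : y + d_y + (L.length : Int) * d_y = y + ((L.length : Nat) + 1 : Int) * d_y := by ring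
      have ex : x + d_x + (L.length : Int) * d_x = x + ((L.length : Nat) + 1 : Int) * d_x := by ring
      rw [ey, ex] at this
      simpa [Nat.cast_succ] using this
    · rw [if_neg hg]
      simpa using hg

lemma pvLine_bound (board : List (List String)) (d_y d_x : Int) (y x : Int)
    (hd : d_y ≠ 0 ∨ d_x ≠ 0) :
    (pvLine board d_y d_x (board.length + 1) y x).length ≤ board.length := by
  by_contra hcon
  have hle := pvLine_length_le board d_y d_x (board.length + 1) y x
  have hm : (pvLine board d_y d_x (board.length + 1) y x).length = board.length + 1 := by omega
  have h0 := (pvLine_get board d_y d_x (board.length + 1) y x 0 (by omega)).1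
  have hn := (pvLine_get board d_y d_x (board.length + 1) y x board.length (by omega)).1
  simp only [Nat.cast_zero, zero_mul, add_zero] at h0
  rcases hd with hd | hd
  · rcases lt_or_gt_of_ne hd with hneg | hpos
    · have : (board.length : Int) * d_y ≤ (board.length : Int) * (-1) :=
        mul_le_mul_of_nonneg_left (by omega) (by positivity)
      have h1 := hn.1
      have h2 := h0.2.1
      linarith
    · have : (board.length : Int) * 1 ≤ (board.length : Int) * d_y :=
        mul_le_mul_of_nonneg_left (by omega) (by positivity)
      have h1 := hn.2.1
      have h2 := h0.1
      linarith
  · rcases lt_or_gt_of_ne hd with hneg | hpos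
    · have : (board.length : Int) * d_x ≤ (board.length : Int) * (-1) :=
        mul_le_mul_of_nonneg_left (by omega) (by positivity)
      have h1 := hn.2.2.1
      have h2 := h0.2.2.2
      linarith
    · have : (board.length : Int) * 1 ≤ (board.length : Int) * d_x :=
        mul_le_mul_of_nonneg_left (by omega) (by positivity)
      have h1 := hn.2.2.2
      have h2 := h0.2.2.1
      linarith

lemma pvCoord_between (a d N M j : Int) (hMj : M ≤ j)
    (h1 : 0 ≤ a + (M - 1) * d) (h2 : a + (M - 1) * d < N)
    (h3 : 0 ≤ a + j * d) (h4 : a + j * d < N) :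
    0 ≤ a + M * d ∧ a + M * d < N := by
  rcases le_total 0 d with hd | hd
  · have hlo : (M - 1) * d ≤ M * d := mul_le_mul_of_nonneg_right (by linarith) hd
    have hup : M * d ≤ j * d := mul_le_mul_of_nonneg_right hMj hd
    exact ⟨by linarith, by linarith⟩
  · have hlo : M * d ≤ (M - 1) * d := mul_le_mul_of_nonpos_right (by linarith) hd
    have hup : j * d ≤ M * d := mul_le_mul_of_nonpos_right hMj hd
    exact ⟨by linarith, by linarith⟩

lemma pvOut_after (N y x d_y d_x M j : Int) (hM : 1 ≤ M) (hMj : M ≤ j)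
    (hin : 0 ≤ y + (M - 1) * d_y ∧ y + (M - 1) * d_y < N ∧
           0 ≤ x + (M - 1) * d_x ∧ x + (M - 1) * d_x < N)
    (hout : ¬(0 ≤ y + M * d_y ∧ y + M * d_y < N ∧ 0 ≤ x + M * d_x ∧ x + M * d_x < N)) :
    ¬(0 ≤ y + j * d_y ∧ y + j * d_y < N ∧ 0 ≤ x + j * d_x ∧ x + j * d_x < N) := by
  intro hj
  exact hout ⟨(pvCoord_between y d_y N M j hMj hin.1 hin.2.1 hj.1 hj.2.1).1,
    (pvCoord_between y d_y N M j hMj hin.1 hin.2.1 hj.1 hj.2.1).2,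
    (pvCoord_between x d_x N M j hMj hin.2.2.1 hin.2.2.2 hj.2.2.1 hj.2.2.2).1,
    (pvCoord_between x d_x N M j hMj hin.2.2.1 hin.2.2.2 hj.2.2.1 hj.2.2.2).2⟩

lemma pvFoldl_and (p : Int → Bool) : ∀ (l : List Int) (b : Bool),
    l.foldl (fun r a => r && p a) b = (b && l.all p) := by
  intro l
  induction l with
  | nil => simp
  | cons a l ih => intro b; simp [List.foldl_cons, ih, Bool.and_assoc]

lemma pvPrefix_getElem? (col : String) :
    ∀ (l : List String) (s : Int) (j : Nat), j ≤ l.length →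
      (pvPrefix col s l)[j]? = some (s + (((l.take j).countP (fun c => c = col)) : Int)) := by
  intro l
  induction l with
  | nil => intro s j hj; simp only [List.length_nil, Nat.le_zero] at hj; subst hj; simp [pvPrefix]
  | cons c cs ih =>
    intro s j hj
    cases j with
    | zero => simp [pvPrefix]
    | succ j =>
      simp only [pvPrefix, List.getElem?_cons_succ, List.take_succ_cons, List.countP_cons]
      rw [ih (s + if c = col then 1 else 0) j (by simpa using hj)]
      by_cases hc : c = col <;> simp [hc] <;> push_cast <;> ring_nf

set_option maxHeartbeats 1600000 in
lemma pvCheck_pointwise (board : List (List String)) (col : String)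
    (y x length d_y d_x : Int)
    (hlen1 : 1 ≤ length)
    (hds : ¬(d_y = 0 ∧ d_x = 0 ∧ 0 ≤ y ∧ y ≤ (board.length : Int) - 1 ∧
        0 ≤ x ∧ x ≤ (board.length : Int) - 1))
    (k : Nat) (hk : k < (pvLine board d_y d_x (board.length + 1) y x).length) :
    pvCheckA board col length d_y d_x (y + (k : Int) * d_y) (x + (k : Int) * d_x) =
      if (k : Int) + length ≤ ((pvLine board d_y d_x (board.length + 1) y x).length : Int) then
        pvCheckB col length (pvLine board d_y d_x (board.length + 1) y x)
          (if 0 ≤ y - d_y ∧ y - d_y < (board.length : Int) ∧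
              0 ≤ x - d_x ∧ x - d_x < (board.length : Int) then
            some (pvCell board (y - d_y) (x - d_x))
          else none) k
      else 0 := by
  set L := pvLine board d_y d_x (board.length + 1) y x with hLdef
  clear_value L
  -- basic geometry of the visited line
  have hm1 : 1 ≤ L.length := by omega
  have hd : d_y ≠ 0 ∨ d_x ≠ 0 := by
    by_contra hcon
    push_neg at hcon
    have h0 := (pvLine_get board d_y d_x (board.length + 1) y x 0 (by rw [← hLdef]; omega)).1
    simp only [Nat.cast_zero, zero_mul, add_zero] at h0
    exact hds ⟨hcon.1, hcon.2, h0.1, by omega, h0.2.2.1, by omega⟩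
  have hbnd : L.length ≤ board.length := by
    have h := pvLine_bound board d_y d_x y x hd
    rw [← hLdef] at h; exact h
  have hexit := pvLine_exit board d_y d_x (board.length + 1) y x (by
    rw [← hLdef]; omega)
  rw [← hLdef] at hexit
  have hin' : 0 ≤ y + ((L.length : Int) - 1) * d_y ∧ y + ((L.length : Int) - 1) * d_y < (board.length : Int) ∧
      0 ≤ x + ((L.length : Int) - 1) * d_x ∧ x + ((L.length : Int) - 1) * d_x < (board.length : Int) := by
    have h := (pvLine_get board d_y d_x (board.length + 1) y x (L.length - 1) (by rw [← hLdef]; omega)).1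
    rw [show ((L.length - 1 : Nat) : Int) = (L.length : Int) - 1 from by omega] at h
    exact h
  have hout : ∀ j : Int, (L.length : Int) ≤ j →
      ¬(0 ≤ y + j * d_y ∧ y + j * d_y < (board.length : Int) ∧
        0 ≤ x + j * d_x ∧ x + j * d_x < (board.length : Int)) :=
    fun j hj => pvOut_after (board.length : Int) y x d_y d_x (L.length : Int) j (by omega) hj hin' hexit
  have hin : ∀ j : Int, 0 ≤ j → j < (L.length : Int) →
      (0 ≤ y + j * d_y ∧ y + j * d_y < (board.length : Int) ∧
       0 ≤ x + j * d_x ∧ x + j * d_x < (board.length : Int)) := by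
    intro j h0 h1
    have h := (pvLine_get board d_y d_x (board.length + 1) y x j.toNat (by rw [← hLdef]; omega)).1
    rw [Int.toNat_of_nonneg h0] at h
    exact h
  have hgetN : ∀ jn : Nat, jn < L.length →
      L[jn]? = some (pvCell board (y + (jn : Int) * d_y) (x + (jn : Int) * d_x)) := by
    intro jn hjn
    have h := (pvLine_get board d_y d_x (board.length + 1) y x jn (by rw [← hLdef]; exact hjn)).2
    rw [← hLdef] at h
    exact h
  have hgetD : ∀ j : Int, 0 ≤ j → j < (L.length : Int) →
      (PySem.List.pyGet? L j).getD "" = pvCell board (y + j * d_y) (x + j * d_x) := by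
    intro j h0 h1
    rw [PySem.List.pyGet?_of_nonneg L h0, hgetN j.toNat (by omega), Int.toNat_of_nonneg h0]
    rfl
  by_cases hwin : (k : Int) + length ≤ (L.length : Int)
  · rw [if_pos hwin]
    simp only [pvCheckA, pvCheckB]
    have hCwin : 0 ≤ y + ↑k * d_y + (length - 1) * d_y ∧
        y + ↑k * d_y + (length - 1) * d_y ≤ (board.length : Int) - 1 ∧
        0 ≤ x + ↑k * d_x + (length - 1) * d_x ∧
        x + ↑k * d_x + (length - 1) * d_x ≤ (board.length : Int) - 1 := by
      have h := hin ((k : Int) + length - 1) (by omega) (by omega)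
      rw [show y + ((k : Int) + length - 1) * d_y = y + ↑k * d_y + (length - 1) * d_y from by ring,
        show x + ((k : Int) + length - 1) * d_x = x + ↑k * d_x + (length - 1) * d_x from by ring] at h
      exact ⟨h.1, by linarith [h.2.1], h.2.2.1, by linarith [h.2.2.2]⟩
    rw [if_pos hCwin]
    refine if_congr ?_ (if_congr ?_ rfl rfl) rfl
    · -- all-of-colour test  ⟺  prefix-difference test
      rw [show (fun (cs : Bool) (i : Int) =>
            if pvCell board (y + ↑k * d_y + i * d_y) (x + ↑k * d_x + i * d_x) ≠ col then false else cs)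
          = fun (cs : Bool) (i : Int) =>
            cs && decide (pvCell board (y + ↑k * d_y + i * d_y) (x + ↑k * d_x + i * d_x) = col) from by
        funext cs i
        by_cases hc : pvCell board (y + ↑k * d_y + i * d_y) (x + ↑k * d_x + i * d_x) = col
        · simp [hc]
        · simp [hc]]
      rw [pvFoldl_and, Bool.true_and, List.all_eq_true]
      have hp1 : (PySem.List.pyGet? (pvPrefix col 0 L) ((k : Int) + length)).getD 0
          = (((L.take (k + length.toNat)).countP (fun c => decide (c = col))) : Int) := by
        rw [PySem.List.pyGet?_of_nonneg _ (by omega : (0 : Int) ≤ (k : Int) + length),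
          pvPrefix_getElem? col L 0 ((k : Int) + length).toNat (by omega),
          show ((k : Int) + length).toNat = k + length.toNat from by omega]
        simp
      have hp0 : (PySem.List.pyGet? (pvPrefix col 0 L) (k : Int)).getD 0
          = (((L.take k).countP (fun c => decide (c = col))) : Int) := by
        rw [PySem.List.pyGet?_of_nonneg _ (by omega : (0 : Int) ≤ (k : Int)),
          pvPrefix_getElem? col L 0 ((k : Int)).toNat (by omega),
          show ((k : Int)).toNat = k from by omega]
        simp
      rw [hp1, hp0, List.take_add, List.countP_append]
      have hWlen : ((L.drop k).take length.toNat).length = length.toNat := by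
        simp only [List.length_take, List.length_drop]
        omega
      have hcellW : ∀ (i : Nat) (hi : i < ((L.drop k).take length.toNat).length),
          ((L.drop k).take length.toNat)[i] =
            pvCell board (y + ↑k * d_y + (i : Int) * d_y) (x + ↑k * d_x + (i : Int) * d_x) := by
        intro i hi
        have hik : k + i < L.length := by omega
        have hg := hgetN (k + i) hik
        rw [List.getElem?_eq_getElem hik] at hg
        have hg' := Option.some.inj hg
        simp only [List.getElem_take, List.getElem_drop]
        rw [hg']
        congr 1 <;> push_cast <;> ring
      constructor
      · intro hall
        have hv : ∀ a ∈ (L.drop k).take length.toNat, (decide (a = col)) = true := by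
          intro a ha
          obtain ⟨i, hi, rfl⟩ := List.mem_iff_getElem.mp ha
          rw [hcellW i hi]
          exact hall ((i : Int)) (by
            rw [PySem.List.mem_pyRange_one]
            constructor
            · omega
            · have := hWlen ▸ hi; omega)
        have hcnt := List.countP_eq_length.mpr hv
        rw [hcnt, hWlen]
        push_cast [Int.toNat_of_nonneg (by omega : (0 : Int) ≤ length)]
        ring
      · intro hEq i hi
        rw [PySem.List.mem_pyRange_one] at hi
        have hcnt : ((L.drop k).take length.toNat).countP (fun c => decide (c = col))
            = ((L.drop k).take length.toNat).length := by
          rw [hWlen]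
          omega
        have hall := List.countP_eq_length.mp hcnt
        have hilt : i.toNat < ((L.drop k).take length.toNat).length := by rw [hWlen]; omega
        have hmem := hall (((L.drop k).take length.toNat)[i.toNat]) (List.getElem_mem hilt)
        rw [hcellW i.toNat hilt] at hmem
        rw [show ((i.toNat : Nat) : Int) = i from by omega] at hmem
        exact hmem
    · -- closedness/neighbour tests coincide
      simp only [is_bounded]
      rw [show y + ↑k * d_y + (length - 1) * d_y - length * d_y = y + ((k : Int) - 1) * d_y from by ring,
        show x + ↑k * d_x + (length - 1) * d_x - length * d_x = x + ((k : Int) - 1) * d_x from by ring,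
        show y + ↑k * d_y + (length - 1) * d_y + d_y = y + ((k : Int) + length) * d_y from by ring,
        show x + ↑k * d_x + (length - 1) * d_x + d_x = x + ((k : Int) + length) * d_x from by ring,
        show y + ↑k * d_y + length * d_y = y + ((k : Int) + length) * d_y from by ring,
        show x + ↑k * d_x + length * d_x = x + ((k : Int) + length) * d_x from by ring,
        show y + ↑k * d_y - d_y = y + ((k : Int) - 1) * d_y from by ring,
        show x + ↑k * d_x - d_x = x + ((k : Int) - 1) * d_x from by ring]
      by_cases hke : (k : Int) + length = (L.length : Int)
      · have he := hout ((k : Int) + length) (by omega)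
        rw [if_neg (show ¬(y + ((k : Int) + length) * d_y ≤ (board.length : Int) - 1 ∧
              x + ((k : Int) + length) * d_x ≤ (board.length : Int) - 1 ∧
              0 ≤ y + ((k : Int) + length) * d_y ∧ 0 ≤ x + ((k : Int) + length) * d_x) from by
            intro hc; exact he ⟨hc.2.2.1, by linarith [hc.1], hc.2.2.2, by linarith [hc.2.1]⟩),
          if_neg (show ¬(0 ≤ y + ((k : Int) + length) * d_y ∧
              y + ((k : Int) + length) * d_y ≤ (board.length : Int) - 1 ∧
              0 ≤ x + ((k : Int) + length) * d_x ∧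
              x + ((k : Int) + length) * d_x ≤ (board.length : Int) - 1) from by
            intro hc; exact he ⟨hc.1, by linarith [hc.2.1], hc.2.2.1, by linarith [hc.2.2.2]⟩),
          if_pos hke]
        clear he
        by_cases hk0 : (k : Int) = 0
        · rw [if_pos hk0,
            show y + ((k : Int) - 1) * d_y = y - d_y from by rw [hk0]; ring,
            show x + ((k : Int) - 1) * d_x = x - d_x from by rw [hk0]; ring]
          by_cases hpin : 0 ≤ y - d_y ∧ y - d_y < (board.length : Int) ∧
              0 ≤ x - d_x ∧ x - d_x < (board.length : Int)
          · rw [if_pos hpin,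
              if_pos (show y - d_y ≤ (board.length : Int) - 1 ∧ x - d_x ≤ (board.length : Int) - 1 ∧
                  0 ≤ y - d_y ∧ 0 ≤ x - d_x from
                ⟨by linarith [hpin.2.1], by linarith [hpin.2.2.2], hpin.1, hpin.2.2.1⟩),
              if_pos (show 0 ≤ y - d_y ∧ y - d_y ≤ (board.length : Int) - 1 ∧
                  0 ≤ x - d_x ∧ x - d_x ≤ (board.length : Int) - 1 from
                ⟨hpin.1, by linarith [hpin.2.1], hpin.2.2.1, by linarith [hpin.2.2.2]⟩)]
            clear hk hLdef hm1 hd hbnd hexit hin' hout hin hgetN hgetD hwin hCwin hds hlen1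
            try clear hke
            try clear hk1
            try clear L
            try dsimp only
            split_ifs <;> simp_all [show (" " : String) ≠ "w" from by decide,
              show (" " : String) ≠ "b" from by decide,
              show ("OPEN" : String) ≠ "CLOSED" from by decide,
              show ("SEMIOPEN" : String) ≠ "CLOSED" from by decide]
          · rw [if_neg hpin,
              if_neg (show ¬(y - d_y ≤ (board.length : Int) - 1 ∧ x - d_x ≤ (board.length : Int) - 1 ∧
                  0 ≤ y - d_y ∧ 0 ≤ x - d_x) from by
                intro hc; exact hpin ⟨hc.2.2.1, by linarith [hc.1], hc.2.2.2, by linarith [hc.2.1]⟩),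
              if_neg (show ¬(0 ≤ y - d_y ∧ y - d_y ≤ (board.length : Int) - 1 ∧
                  0 ≤ x - d_x ∧ x - d_x ≤ (board.length : Int) - 1) from by
                intro hc; exact hpin ⟨hc.1, by linarith [hc.2.1], hc.2.2.1, by linarith [hc.2.2.2]⟩)]
            clear hk hLdef hm1 hd hbnd hexit hin' hout hin hgetN hgetD hwin hCwin hds hlen1
            try clear hke
            try clear hk1
            try clear L
            try dsimp only
            split_ifs <;> simp_all [show (" " : String) ≠ "w" from by decide,
              show (" " : String) ≠ "b" from by decide,
              show ("OPEN" : String) ≠ "CLOSED" from by decide,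
              show ("SEMIOPEN" : String) ≠ "CLOSED" from by decide]
        · have hk1 : 1 ≤ (k : Int) := by omega
          have hs := hin ((k : Int) - 1) (by omega) (by omega)
          rw [if_neg hk0,
            if_pos (show y + ((k : Int) - 1) * d_y ≤ (board.length : Int) - 1 ∧
                x + ((k : Int) - 1) * d_x ≤ (board.length : Int) - 1 ∧
                0 ≤ y + ((k : Int) - 1) * d_y ∧ 0 ≤ x + ((k : Int) - 1) * d_x from
              ⟨by linarith [hs.2.1], by linarith [hs.2.2.2], hs.1, hs.2.2.1⟩),
            if_pos (show 0 ≤ y + ((k : Int) - 1) * d_y ∧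
                y + ((k : Int) - 1) * d_y ≤ (board.length : Int) - 1 ∧
                0 ≤ x + ((k : Int) - 1) * d_x ∧
                x + ((k : Int) - 1) * d_x ≤ (board.length : Int) - 1 from
              ⟨hs.1, by linarith [hs.2.1], hs.2.2.1, by linarith [hs.2.2.2]⟩),
            hgetD ((k : Int) - 1) (by omega) (by omega)]
          clear hs
          clear hk hLdef hm1 hd hbnd hexit hin' hout hin hgetN hgetD hwin hCwin hds hlen1
          try clear hke
          try clear hk1
          try clear L
          try dsimp only
          split_ifs <;> simp_all [show (" " : String) ≠ "w" from by decide,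
            show (" " : String) ≠ "b" from by decide,
            show ("OPEN" : String) ≠ "CLOSED" from by decide,
            show ("SEMIOPEN" : String) ≠ "CLOSED" from by decide]
      · have hlt : (k : Int) + length < (L.length : Int) := by omega
        have he := hin ((k : Int) + length) (by omega) hlt
        rw [if_pos (show y + ((k : Int) + length) * d_y ≤ (board.length : Int) - 1 ∧
              x + ((k : Int) + length) * d_x ≤ (board.length : Int) - 1 ∧
              0 ≤ y + ((k : Int) + length) * d_y ∧ 0 ≤ x + ((k : Int) + length) * d_x from
            ⟨by linarith [he.2.1], by linarith [he.2.2.2], he.1, he.2.2.1⟩),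
          if_pos (show 0 ≤ y + ((k : Int) + length) * d_y ∧
              y + ((k : Int) + length) * d_y ≤ (board.length : Int) - 1 ∧
              0 ≤ x + ((k : Int) + length) * d_x ∧
              x + ((k : Int) + length) * d_x ≤ (board.length : Int) - 1 from
            ⟨he.1, by linarith [he.2.1], he.2.2.1, by linarith [he.2.2.2]⟩),
          if_neg hke, hgetD ((k : Int) + length) (by omega) hlt]
        clear he hlt
        by_cases hk0 : (k : Int) = 0
        · rw [if_pos hk0,
            show y + ((k : Int) - 1) * d_y = y - d_y from by rw [hk0]; ring,
            show x + ((k : Int) - 1) * d_x = x - d_x from by rw [hk0]; ring]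
          by_cases hpin : 0 ≤ y - d_y ∧ y - d_y < (board.length : Int) ∧
              0 ≤ x - d_x ∧ x - d_x < (board.length : Int)
          · rw [if_pos hpin,
              if_pos (show y - d_y ≤ (board.length : Int) - 1 ∧ x - d_x ≤ (board.length : Int) - 1 ∧
                  0 ≤ y - d_y ∧ 0 ≤ x - d_x from
                ⟨by linarith [hpin.2.1], by linarith [hpin.2.2.2], hpin.1, hpin.2.2.1⟩),
              if_pos (show 0 ≤ y - d_y ∧ y - d_y ≤ (board.length : Int) - 1 ∧
                  0 ≤ x - d_x ∧ x - d_x ≤ (board.length : Int) - 1 from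
                ⟨hpin.1, by linarith [hpin.2.1], hpin.2.2.1, by linarith [hpin.2.2.2]⟩)]
            clear hk hLdef hm1 hd hbnd hexit hin' hout hin hgetN hgetD hwin hCwin hds hlen1
            try clear hke
            try clear hk1
            try clear L
            try dsimp only
            split_ifs <;> simp_all [show (" " : String) ≠ "w" from by decide,
              show (" " : String) ≠ "b" from by decide,
              show ("OPEN" : String) ≠ "CLOSED" from by decide,
              show ("SEMIOPEN" : String) ≠ "CLOSED" from by decide]
          · rw [if_neg hpin,
              if_neg (show ¬(y - d_y ≤ (board.length : Int) - 1 ∧ x - d_x ≤ (board.length : Int) - 1 ∧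
                  0 ≤ y - d_y ∧ 0 ≤ x - d_x) from by
                intro hc; exact hpin ⟨hc.2.2.1, by linarith [hc.1], hc.2.2.2, by linarith [hc.2.1]⟩),
              if_neg (show ¬(0 ≤ y - d_y ∧ y - d_y ≤ (board.length : Int) - 1 ∧
                  0 ≤ x - d_x ∧ x - d_x ≤ (board.length : Int) - 1) from by
                intro hc; exact hpin ⟨hc.1, by linarith [hc.2.1], hc.2.2.1, by linarith [hc.2.2.2]⟩)]
            clear hk hLdef hm1 hd hbnd hexit hin' hout hin hgetN hgetD hwin hCwin hds hlen1
            try clear hke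
            try clear hk1
            try clear L
            try dsimp only
            split_ifs <;> simp_all [show (" " : String) ≠ "w" from by decide,
              show (" " : String) ≠ "b" from by decide,
              show ("OPEN" : String) ≠ "CLOSED" from by decide,
              show ("SEMIOPEN" : String) ≠ "CLOSED" from by decide]
        · have hk1 : 1 ≤ (k : Int) := by omega
          have hs := hin ((k : Int) - 1) (by omega) (by omega)
          rw [if_neg hk0,
            if_pos (show y + ((k : Int) - 1) * d_y ≤ (board.length : Int) - 1 ∧
                x + ((k : Int) - 1) * d_x ≤ (board.length : Int) - 1 ∧
                0 ≤ y + ((k : Int) - 1) * d_y ∧ 0 ≤ x + ((k : Int) - 1) * d_x from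
              ⟨by linarith [hs.2.1], by linarith [hs.2.2.2], hs.1, hs.2.2.1⟩),
            if_pos (show 0 ≤ y + ((k : Int) - 1) * d_y ∧
                y + ((k : Int) - 1) * d_y ≤ (board.length : Int) - 1 ∧
                0 ≤ x + ((k : Int) - 1) * d_x ∧
                x + ((k : Int) - 1) * d_x ≤ (board.length : Int) - 1 from
              ⟨hs.1, by linarith [hs.2.1], hs.2.2.1, by linarith [hs.2.2.2]⟩),
            hgetD ((k : Int) - 1) (by omega) (by omega)]
          clear hs
          clear hk hLdef hm1 hd hbnd hexit hin' hout hin hgetN hgetD hwin hCwin hds hlen1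
          try clear hke
          try clear hk1
          try clear L
          try dsimp only
          split_ifs <;> simp_all [show (" " : String) ≠ "w" from by decide,
            show (" " : String) ≠ "b" from by decide,
            show ("OPEN" : String) ≠ "CLOSED" from by decide,
            show ("SEMIOPEN" : String) ≠ "CLOSED" from by decide]
  · rw [if_neg hwin]
    simp only [pvCheckA]
    rw [if_neg]
    intro hC
    refine hout ((k : Int) + length - 1) (by omega) ?_
    rw [show y + ((k : Int) + length - 1) * d_y = y + ↑k * d_y + (length - 1) * d_y from by ring,
      show x + ((k : Int) + length - 1) * d_x = x + ↑k * d_x + (length - 1) * d_x from by ring]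
    exact ⟨hC.1, by linarith [hC.2.1], hC.2.2.1, by linarith [hC.2.2.2]⟩

-- ===== VERDICT (by name: the statement is the Claim_ definition above) =====
theorem detect_closedrow_spec : Claim_equal_detect_closedrow := by
  intro board col y x length d_y d_x hdom hpre
  unfold Spec_detect_closedrow
  by_cases hg : length < 1 ∨ ((pvLine board d_y d_x (board.length + 1) y x).length : Int) < length
  · -- B exits early with 0; A's loop counts nothing since no window fits
    have hB : detect_closedrow_alt board col y x length d_y d_x = 0 := by
      simp only [detect_closedrow_alt]
      rw [if_pos hg]
    rw [hB, detect_closedrow, pvALoop_sum, zero_add]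
    rcases Nat.eq_zero_or_pos (pvLine board d_y d_x (board.length + 1) y x).length with hm | hm
    · rw [hm]; simp
    · have honb := (pvLine_get board d_y d_x (board.length + 1) y x 0 (by omega)).1
      simp only [Nat.cast_zero, zero_mul, add_zero] at honb
      rcases hpre with hoff | ⟨hlen1, _, hdir⟩
      · exact absurd ⟨honb.1, by omega, honb.2.2.1, by omega⟩ hoff
      · have hds : ¬(d_y = 0 ∧ d_x = 0 ∧ 0 ≤ y ∧ y ≤ (board.length : Int) - 1 ∧
            0 ≤ x ∧ x ≤ (board.length : Int) - 1) := by
          intro hc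
          rcases hdir with h | h
          · exact h hc.1
          · exact h hc.2.1
        have hmlen : ((pvLine board d_y d_x (board.length + 1) y x).length : Int) < length := by
          rcases hg with h | h
          · omega
          · exact h
        apply List.sum_eq_zero
        intro z hz
        obtain ⟨kk, hkk, rfl⟩ := List.mem_map.mp hz
        rw [pvCheck_pointwise board col y x length d_y d_x hlen1 hds kk (List.mem_range.mp hkk),
          if_neg (by omega)]
  · have hlen1 : 1 ≤ length := by omega
    have hmge : length ≤ ((pvLine board d_y d_x (board.length + 1) y x).length : Int) := by omega
    have hm1 : 1 ≤ (pvLine board d_y d_x (board.length + 1) y x).length := by omega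
    have honb := (pvLine_get board d_y d_x (board.length + 1) y x 0 (by omega)).1
    simp only [Nat.cast_zero, zero_mul, add_zero] at honb
    rcases hpre with hoff | ⟨_, _, hdir⟩
    · exact absurd ⟨honb.1, by omega, honb.2.2.1, by omega⟩ hoff
    have hds : ¬(d_y = 0 ∧ d_x = 0 ∧ 0 ≤ y ∧ y ≤ (board.length : Int) - 1 ∧
        0 ≤ x ∧ x ≤ (board.length : Int) - 1) := by
      intro hc
      rcases hdir with h | h
      · exact h hc.1
      · exact h hc.2.1
    rw [detect_closedrow, pvALoop_sum, zero_add, pvAlt_sum board col y x length d_y d_x hg]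
    have hpt := pvCheck_pointwise board col y x length d_y d_x hlen1 hds
    set L := pvLine board d_y d_x (board.length + 1) y x with hLdef
    set pre : Option String :=
      (if 0 ≤ y - d_y ∧ y - d_y < (board.length : Int) ∧
          0 ≤ x - d_x ∧ x - d_x < (board.length : Int) then
        some (pvCell board (y - d_y) (x - d_x))
      else none) with hpre2
    have hmap : (List.range L.length).map
          (fun (k : Nat) => pvCheckA board col length d_y d_x (y + (k : Int) * d_y) (x + (k : Int) * d_x))
        = (List.range L.length).map
          (fun (k : Nat) => if (k : Int) + length ≤ (L.length : Int) then pvCheckB col length L pre k else 0) :=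
      List.map_congr_left (fun k hk => hpt k (List.mem_range.mp hk))
    rw [hmap]
    by_cases hneg : (L.length : Int) - length + 1 ≤ 0
    · rw [PySem.List.pyRange_one_eq_nil (by omega)]
      simp only [List.map_nil, List.sum_nil]
      apply List.sum_eq_zero
      intro z hz
      obtain ⟨kk, hkk, rfl⟩ := List.mem_map.mp hz
      rw [if_neg (by omega)]
    · push_neg at hneg
      set tN := ((L.length : Int) - length + 1).toNat with htN
      rw [show (List.range L.length : List Nat) = List.range (tN + (L.length - tN)) from by
          congr 1; omega,
        List.range_add, List.map_append, List.sum_append, List.map_map]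
      have hzero : ((List.range (L.length - tN)).map
          ((fun (k : Nat) => if (k : Int) + length ≤ (L.length : Int) then pvCheckB col length L pre k else 0)
            ∘ fun i => tN + i)).sum = 0 := by
        apply List.sum_eq_zero
        intro z hz
        obtain ⟨kk, hkk, rfl⟩ := List.mem_map.mp hz
        simp only [Function.comp_apply]
        rw [if_neg (by push_cast; omega)]
      rw [hzero, add_zero, PySem.List.pyRange_one, List.map_map,
        show ((L.length : Int) - length + 1 - 0) = (L.length : Int) - length + 1 from by ring, ← htN]
      refine congrArg List.sum (List.map_congr_left ?_)
      intro kk hkk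
      have hkt : kk < tN := List.mem_range.mp hkk
      rw [if_pos (by omega)]
      simp only [Function.comp_apply, zero_add]
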